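-- pv_equiv track=rewrite | github.com/Range18/maze_sort_tochka | run2.py | get_min_distance_gateway
-- ===== SOURCE A (Python) =====
-- def get_min_distance_gateway(distances: dict[str, int]) -> str:
--     min_distance: float = float('inf')
--     target: str | None = None
--     for gateway, distance in distances.items():
--         if distance < min_distance:
--             min_distance = distance
--             target = gateway
--         if distance == min_distance:
--             if target is None or gateway < target:
--                 min_distance = distance
--                 target = gateway
--     return target
-- ===== SOURCE B (Python) =====
-- def get_min_distance_gateway(distances: dict[str, int]) -> str:
--     if not distances:
--         return None
--     return sorted(distances.items(), key=lambda kv: (kv[1], kv[0]))[0][0]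
-- ===== Notes on version B (the rewrite author's own statement) =====
-- stated objective: simpler
-- what changed: Replaces A's running-min scan with two mutable state variables (min distance, target name) by sorting the items on the tuple key (distance, name) and taking the head; the empty-dict guard keeps A's None return.
-- outside the precondition, e.g. on get_min_distance_gateway({}): A returns None, B returns None
import Mathlib
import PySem

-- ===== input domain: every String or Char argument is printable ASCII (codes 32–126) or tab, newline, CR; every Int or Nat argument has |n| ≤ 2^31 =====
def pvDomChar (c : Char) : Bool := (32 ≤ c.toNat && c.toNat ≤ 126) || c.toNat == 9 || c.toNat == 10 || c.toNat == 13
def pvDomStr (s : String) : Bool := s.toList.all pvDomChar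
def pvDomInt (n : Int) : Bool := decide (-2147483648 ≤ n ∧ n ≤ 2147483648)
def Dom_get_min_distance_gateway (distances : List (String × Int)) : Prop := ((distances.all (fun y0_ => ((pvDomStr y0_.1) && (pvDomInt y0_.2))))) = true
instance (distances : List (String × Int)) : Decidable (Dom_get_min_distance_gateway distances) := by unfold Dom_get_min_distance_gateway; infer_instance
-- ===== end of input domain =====

-- B replaces A's running-min scan over two state variables by sorting the items on the
-- tuple key (distance, name) and taking the head: a simpler one-liner (objective: simpler).


-- ===== PORT A =====
-- A's loop body, line for line. min_distance : float = inf is modelled as Option Int with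
-- none = inf (d < inf is true, d == inf is false); target : str | None is Option String.
def pvLoopA (st : Option Int × Option String) (gd : String × Int) : Option Int × Option String :=
  let minD := st.1
  let target := st.2
  let g := gd.1
  let d := gd.2
  -- if distance < min_distance: min_distance = distance; target = gateway
  let st1 : Option Int × Option String :=
    if (match minD with | none => true | some m => decide (d < m)) then (some d, some g)
    else (minD, target)
  -- if distance == min_distance: (an int never equals float('inf'))
  if st1.1 = some d then
    -- if target is None or gateway < target:
    if (match st1.2 with | none => true | some t => decide (g < t)) then (some d, some g)
    else st1
  else st1

-- On the empty dict Python returns None, which is not a String: that input is outside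
-- Pre_ and the port returns "" there.
def get_min_distance_gateway (distances : List (String × Int)) : String :=
  match (distances.foldl pvLoopA (none, none)).2 with
  | some t => t
  | none => ""

-- ===== PORT B =====
-- Python returns None on the empty dict (outside Pre_); the port returns "" there.
def get_min_distance_gateway_alt (distances : List (String × Int)) : String :=
  if distances.isEmpty then ""
  else
    match PySem.List.sorted2 distances (fun kv => kv.2) (fun kv => kv.1) with
    | (name, _) :: _ => name
    | [] => ""

-- ===== PRECONDITION & SPEC =====
-- Pre_ excludes the empty dict, on which Python A returns None (not a str), and lists with
-- duplicate keys, which do not arise from a Python dict (its keys are distinct); this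
-- excludes no input the Python function actually accepts.
def Pre_get_min_distance_gateway (distances : List (String × Int)) : Prop :=
  distances ≠ [] ∧ (distances.map Prod.fst).Nodup
instance (distances : List (String × Int)) : Decidable (Pre_get_min_distance_gateway distances) := by
  unfold Pre_get_min_distance_gateway; infer_instance

def pvWitness_get_min_distance_gateway : (List (String × Int)) := [("b", 3), ("a", 3), ("c", 1)]

def Spec_get_min_distance_gateway (distances : List (String × Int)) (out : String) : Prop := out = get_min_distance_gateway_alt distances
instance (distances : List (String × Int)) (out : String) : Decidable (Spec_get_min_distance_gateway distances out) := by unfold Spec_get_min_distance_gateway; infer_instance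

-- ===== CLAIM (what is proved, stated in full; the proofs are below) =====
def Claim_equal_get_min_distance_gateway : Prop := ∀ (distances : List (String × Int)), Dom_get_min_distance_gateway distances → Pre_get_min_distance_gateway distances → Spec_get_min_distance_gateway distances (get_min_distance_gateway distances)

-- ===== LEMMAS AND PROOFS =====

-- the comparison sorted2 uses for key kv ↦ (kv.2, kv.1): strict lexicographic "smaller"
def pvBefore (a b : String × Int) : Bool :=
  decide (a.2 < b.2) || (!decide (b.2 < a.2) && decide (a.1 < b.1))

-- one step of a running lexicographic minimum, first-biased
def pvStep (m y : String × Int) : String × Int := if pvBefore y m then y else m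

-- A's loop body on an already-initialised state is one pvStep (state mirrored as (name, dist))
lemma stepA_eq (m : Int) (t : String) (gd : String × Int) :
    pvLoopA (some m, some t) gd = (some (pvStep (t, m) gd).2, some (pvStep (t, m) gd).1) := by
  obtain ⟨g, d⟩ := gd
  simp only [pvLoopA, pvStep, pvBefore]
  by_cases h1 : d < m
  · simp [h1, not_lt_of_gt h1]
  · by_cases h2 : m < d
    · have hne : ((some m : Option Int) = some d) = False := by
        simp; omega
      simp [h1, h2, hne]
    · have he : m = d := le_antisymm (not_lt.mp h1) (not_lt.mp h2)
      subst he
      by_cases h3 : g < t <;> simp [h3]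

-- A's first iteration, from the uninitialised state
lemma stepA_init (gd : String × Int) : pvLoopA (none, none) gd = (some gd.2, some gd.1) := by
  obtain ⟨g, d⟩ := gd
  simp [pvLoopA]

-- A's whole fold from an initialised state is the running lexicographic minimum
lemma foldA (xs : List (String × Int)) : ∀ (m : Int) (t : String),
    xs.foldl pvLoopA (some m, some t)
      = (some (xs.foldl pvStep (t, m)).2, some (xs.foldl pvStep (t, m)).1) := by
  induction xs with
  | nil => intro m t; rfl
  | cons y ys ih =>
    intro m t
    simp only [List.foldl_cons, stepA_eq]
    exact ih (pvStep (t, m) y).2 (pvStep (t, m) y).1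

-- insertBy on a nonempty list: one equation
lemma insertBy_cons (y a : String × Int) (l : List (String × Int)) :
    PySem.List.insertBy pvBefore y (a :: l)
      = if pvBefore y a then y :: a :: l else a :: PySem.List.insertBy pvBefore y l := by
  simp [PySem.List.insertBy]

-- B's insertion-sort fold keeps the running lexicographic minimum at the head
lemma foldB (xs : List (String × Int)) : ∀ (a : String × Int) (l : List (String × Int)),
    ∃ l', xs.foldl (fun acc x => PySem.List.insertBy pvBefore x acc) (a :: l)
            = (xs.foldl pvStep a) :: l' := by
  induction xs with
  | nil => intro a l; exact ⟨l, rfl⟩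
  | cons y ys ih =>
    intro a l
    simp only [List.foldl_cons, insertBy_cons]
    by_cases h : pvBefore y a
    · simpa [pvStep, h] using ih y (a :: l)
    · simpa [pvStep, h] using ih a (PySem.List.insertBy pvBefore y l)

-- ===== VERDICT (by name: the statement is the Claim_ definition above) =====
theorem get_min_distance_gateway_spec : Claim_equal_get_min_distance_gateway := by
  intro distances _hdom hpre
  unfold Spec_get_min_distance_gateway
  obtain ⟨hne, _⟩ := hpre
  match distances, hne with
  | (g0, d0) :: xs, _ =>
    have hA : get_min_distance_gateway ((g0, d0) :: xs) = (xs.foldl pvStep (g0, d0)).1 := by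
      unfold get_min_distance_gateway
      rw [List.foldl_cons, stepA_init, foldA xs d0 g0]
    have hB : get_min_distance_gateway_alt ((g0, d0) :: xs) = (xs.foldl pvStep (g0, d0)).1 := by
      unfold get_min_distance_gateway_alt
      have hs : PySem.List.sorted2 ((g0, d0) :: xs) (fun kv => kv.2) (fun kv => kv.1)
          = ((g0, d0) :: xs).foldl (fun acc x => PySem.List.insertBy pvBefore x acc) [] := rfl
      rw [hs]
      simp only [List.foldl_cons]
      have h0 : PySem.List.insertBy pvBefore (g0, d0) ([] : List (String × Int)) = [(g0, d0)] := by
        simp [PySem.List.insertBy]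
      rw [h0]
      obtain ⟨l', hl'⟩ := foldB xs (g0, d0) []
      rw [hl']
      simp
    rw [hA, hB]
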